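-- pv_equiv track=rewrite | github.com/AesmaDiv/PumpTest | AesmaLib/ArrayFuncs.py | remove_greater
-- ===== SOURCE A (Python) =====
-- def remove_greater(array: list, value, is_including=False):
--     result, index = array.copy(), -1
--     if len(result):
--         indices = [i for i, v in enumerate(result) if v > value]
--         if indices:
--             index = min(indices)
--             index -= 1 if is_including else 0
--             del result[index:]
--     return result, index
-- ===== SOURCE B (Python) =====
-- def remove_greater(array: list, value, is_including=False):
--     for i, v in enumerate(array):
--         if v > value:
--             index = i - (1 if is_including else 0)
--             return array[:index], index
--     return array.copy(), -1
-- ===== Notes on version B (the rewrite author's own statement) =====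
-- stated objective: simpler
-- what changed: B finds the first exceeding element with a single early-exit scan and returns a slice, instead of building the full list of all exceeding indices and taking its min before deleting a tail in place.
import Mathlib
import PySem

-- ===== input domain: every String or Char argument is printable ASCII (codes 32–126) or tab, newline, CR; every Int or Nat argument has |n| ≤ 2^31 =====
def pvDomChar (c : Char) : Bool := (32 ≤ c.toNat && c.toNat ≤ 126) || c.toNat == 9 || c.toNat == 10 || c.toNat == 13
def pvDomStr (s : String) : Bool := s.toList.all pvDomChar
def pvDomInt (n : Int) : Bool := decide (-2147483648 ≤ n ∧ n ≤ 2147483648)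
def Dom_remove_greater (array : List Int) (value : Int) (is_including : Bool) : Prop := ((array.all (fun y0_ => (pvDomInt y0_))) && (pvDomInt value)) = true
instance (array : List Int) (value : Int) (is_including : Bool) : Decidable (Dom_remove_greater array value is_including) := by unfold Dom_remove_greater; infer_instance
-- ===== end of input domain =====

-- B replaces A's "collect all exceeding indices, take their min, delete in place" with a
-- single early-exit scan returning a slice (objective: simpler).

-- ===== PORT A =====
def remove_greater (array : List Int) (value : Int) (is_including : Bool) : List Int × Int :=
  -- result, index = array.copy(), -1
  let result := array
  let index : Int := -1
  if result.length ≠ 0 then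
    -- indices = [i for i, v in enumerate(result) if v > value]
    let indices := ((PySem.List.enumerate result 0).filter (fun p => value < p.2)).map (·.1)
    if indices.isEmpty then (result, index)
    else
      -- index = min(indices); index -= 1 if is_including else 0; del result[index:]
      let index := (PySem.List.min? indices (fun i => i)).getD 0
      let index := index - (if is_including then 1 else 0)
      (PySem.List.slice result none (some index), index)
  else (result, index)

-- ===== PORT B =====
-- first index i (counting from s) with value < v, scanning with early exit
def pvFindFirst (xs : List Int) (value : Int) (s : Int) : Option Int :=
  match xs with
  | [] => none
  | v :: rest => if value < v then some s else pvFindFirst rest value (s + 1)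

def remove_greater_alt (array : List Int) (value : Int) (is_including : Bool) : List Int × Int :=
  match pvFindFirst array value 0 with
  | some i =>
      let index := i - (if is_including then 1 else 0)
      (PySem.List.slice array none (some index), index)
  | none => (array, -1)

-- ===== PRECONDITION & SPEC =====
def Spec_remove_greater (array : List Int) (value : Int) (is_including : Bool) (out : List Int × Int) : Prop := out = remove_greater_alt array value is_including
instance (array : List Int) (value : Int) (is_including : Bool) (out : List Int × Int) : Decidable (Spec_remove_greater array value is_including out) := by unfold Spec_remove_greater; infer_instance

-- ===== CLAIM (what is proved, stated in full; the proofs are below) =====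
def Claim_equal_remove_greater : Prop := ∀ (array : List Int) (value : Int) (is_including : Bool), Dom_remove_greater array value is_including → Spec_remove_greater array value is_including (remove_greater array value is_including)

-- ===== LEMMAS AND PROOFS =====

-- A's index-comprehension, as a function of the enumerate start
def pvIdxs (xs : List Int) (value : Int) (s : Int) : List Int :=
  ((PySem.List.enumerate xs s).filter (fun p => value < p.2)).map (·.1)

theorem pvIdxs_nil (value s : Int) : pvIdxs [] value s = [] := rfl

theorem pvIdxs_cons (v : Int) (xs : List Int) (value s : Int) :
    pvIdxs (v :: xs) value s =
      if value < v then s :: pvIdxs xs value (s + 1) else pvIdxs xs value (s + 1) := by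
  simp only [pvIdxs, PySem.List.enumerate_cons, List.filter_cons]
  split_ifs with h h1 h1 <;> simp_all

theorem pvIdxs_le (xs : List Int) (value s : Int) :
    ∀ j ∈ pvIdxs xs value s, s ≤ j := by
  induction xs generalizing s with
  | nil => simp [pvIdxs_nil]
  | cons v rest ih =>
    intro j hj
    rw [pvIdxs_cons] at hj
    split_ifs at hj with h
    · rcases List.mem_cons.mp hj with h1 | h1
      · omega
      · have := ih (s + 1) j h1; omega
    · have := ih (s + 1) j hj; omega

-- the foldl inside min? keeps `some a` when no later element is smaller
theorem pvFoldl_min_stay {α κ : Type} [LT κ] [DecidableLT κ] (key : α → κ) (L : List α)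
    (a : α) (h : ∀ y ∈ L, ¬ key y < key a) :
    L.foldl (fun acc x =>
        match acc with
        | none => some x
        | some m => if key x < key m then some x else some m) (some a) = some a := by
  induction L with
  | nil => rfl
  | cons y rest ih =>
    have hy : ¬ key y < key a := h y (by simp)
    simp only [List.foldl_cons, if_neg hy]
    exact ih (fun z hz => h z (by simp [hz]))

theorem pvMin_eq_findFirst (xs : List Int) (value s : Int) :
    PySem.List.min? (pvIdxs xs value s) (fun i => i) = pvFindFirst xs value s := by
  induction xs generalizing s with
  | nil => rfl
  | cons v rest ih =>
    rw [pvIdxs_cons]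
    by_cases h : value < v
    · simp only [if_pos h, pvFindFirst]
      simpa [PySem.List.min?] using pvFoldl_min_stay (fun i : Int => i) (pvIdxs rest value (s + 1)) s
        (fun y hy => by have := pvIdxs_le rest value (s + 1) y hy; simp only []; omega)
    · simp only [if_neg h, pvFindFirst]
      exact ih (s + 1)

theorem pvIdxs_empty_iff (xs : List Int) (value s : Int) :
    (pvIdxs xs value s).isEmpty = true ↔ pvFindFirst xs value s = none := by
  induction xs generalizing s with
  | nil => simp [pvIdxs_nil, pvFindFirst]
  | cons v rest ih =>
    rw [pvIdxs_cons]
    by_cases h : value < v <;> simp [h, pvFindFirst, ih]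

-- ===== VERDICT (by name: the statement is the Claim_ definition above) =====
theorem remove_greater_spec : Claim_equal_remove_greater := by
  intro array value is_including _
  show remove_greater array value is_including = remove_greater_alt array value is_including
  unfold remove_greater remove_greater_alt
  cases array with
  | nil => rfl
  | cons v rest =>
    simp only [List.length_cons, ne_eq, Nat.succ_ne_zero, not_false_eq_true, if_true]
    have hidx : ((PySem.List.enumerate (v :: rest) 0).filter (fun p => value < p.2)).map (·.1)
        = pvIdxs (v :: rest) value 0 := rfl
    rw [hidx]
    cases hf : pvFindFirst (v :: rest) value 0 with
    | none =>
      have he : (pvIdxs (v :: rest) value 0).isEmpty = true :=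
        (pvIdxs_empty_iff _ _ _).mpr hf
      simp [he]
    | some i =>
      have he : ¬ (pvIdxs (v :: rest) value 0).isEmpty = true := by
        rw [pvIdxs_empty_iff, hf]; simp
      have hm : PySem.List.min? (pvIdxs (v :: rest) value 0) (fun i => i) = some i := by
        rw [pvMin_eq_findFirst, hf]
      simp [he, hm]
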